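-- pv_equiv track=rewrite | github.com/TasosVoudouris/CryptoCave | Secret Sharing/ReedGao.py | lagrange_polynomials
-- ===== SOURCE A (Python) =====
-- PRIME = 433
--
-- def base_egcd(a, b):
--     r0, r1 = a, b
--     s0, s1 = 1, 0
--     t0, t1 = 0, 1
--
--     while r1 != 0:
--         q, r2 = divmod(r0, r1)
--         r0, s0, t0, r1, s1, t1 = \
--             r1, s1, t1, \
--             r2, s0 - s1*q, t0 - t1*q
--
--     d = r0
--     s = s0
--     t = t0
--     return d, s, t
--
-- def base_inverse(a):
--     _, b, _ = base_egcd(a, PRIME)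
--     return b if b >= 0 else b+PRIME
--
-- def base_add(a, b):
--     return (a + b) % PRIME
--
-- def base_sub(a, b):
--     return (a - b) % PRIME
--
-- def base_mul(a, b):
--     return (a * b) % PRIME
--
-- def base_div(a, b):
--     return base_mul(a, base_inverse(b))
--
-- def canonical(A):
--     for i in reversed(range(len(A))):
--         if A[i] != 0:
--             return A[:i+1]
--     return []
--
-- def poly_scalardiv(A, b):
--     return canonical([ base_div(a, b) for a in A ])
--
-- def poly_mul(A, B):
--     C = [0] * (len(A) + len(B) - 1)
--     for i in range(len(A)):
--         for j in range(len(B)):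
--             C[i+j] = base_add(C[i+j], base_mul(A[i], B[j]))
--     return canonical(C)
--
-- def lagrange_polynomials(xs):
--     polys = []
--     for i, xi in enumerate(xs):
--         numerator = [1]
--         denominator = 1
--         for j, xj in enumerate(xs):
--             if i == j: continue
--             numerator   = poly_mul(numerator, [base_sub(0, xj), 1])
--             denominator = base_mul(denominator, base_sub(xi, xj))
--         poly = poly_scalardiv(numerator, denominator)
--         polys.append(poly)
--     return polys
-- ===== SOURCE B (Python) =====
-- PRIME = 433
--
-- def lagrange_polynomials(xs):
--     p = PRIME
--     n = len(xs)
--     # master polynomial prod_j (x - x_j), coefficients lowest-first, built once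
--     master = [1]
--     for xj in xs:
--         c = (-xj) % p
--         out = []
--         prev = 0
--         for a in master:
--             out.append((c * a + prev) % p)
--             prev = a
--         out.append(prev)
--         master = out
--     polys = []
--     for i, xi in enumerate(xs):
--         # numerator = master / (x - xi) by synthetic division (top down)
--         q_rev = []
--         acc = master[n]
--         for k in range(n - 1, -1, -1):
--             q_rev.append(acc)
--             acc = (master[k] + xi * acc) % p
--         numerator = q_rev[::-1]
--         # denominator = prod_{j != i} (xi - xj)
--         d = 1
--         for j, xj in enumerate(xs):
--             if j != i:
--                 d = d * (xi - xj) % p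
--         inv = pow(d, p - 2, p)
--         poly = [a * inv % p for a in numerator]
--         while poly and poly[-1] == 0:
--             poly.pop()
--         polys.append(poly)
--     return polys
-- ===== Notes on version B (the rewrite author's own statement) =====
-- stated objective: faster
-- what changed: Instead of re-multiplying the n-1 linear factors for every index i (O(n^3)), B builds the master polynomial prod_j (x - x_j) once and obtains each numerator by one synthetic-division pass removing the factor (x - x_i), with the modular inverse via pow(d, p-2, p); total O(n^2).
import Mathlib
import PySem

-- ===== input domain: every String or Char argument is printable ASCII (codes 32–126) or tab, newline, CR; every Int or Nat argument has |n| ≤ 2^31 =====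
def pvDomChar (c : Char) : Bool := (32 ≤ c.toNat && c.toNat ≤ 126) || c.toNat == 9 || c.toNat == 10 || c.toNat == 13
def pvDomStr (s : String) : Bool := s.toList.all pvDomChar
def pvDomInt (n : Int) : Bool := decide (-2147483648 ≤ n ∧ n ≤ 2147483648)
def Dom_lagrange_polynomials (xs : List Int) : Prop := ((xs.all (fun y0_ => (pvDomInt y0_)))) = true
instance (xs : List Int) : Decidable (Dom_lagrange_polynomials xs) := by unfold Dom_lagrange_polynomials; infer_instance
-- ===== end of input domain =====

-- B replaces A's per-index product of n-1 linear factors (O(n^3)) by one master polynomial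
-- and a synthetic-division pass per index (O(n^2)); same return value, objective: faster.

-- ===== PORT A =====
def pvPRIME : Int := 433

-- while-loop of base_egcd, with fuel = |r1| + 1; fuel is an upper bound on the number of
-- iterations (|r| strictly decreases each round), so the 0-fuel branch is never taken.
def pvEgcdLoop : Nat → Int → Int → Int → Int → Int → Int → Int × Int × Int
  | 0, r0, s0, t0, _, _, _ => (r0, s0, t0)
  | fuel + 1, r0, s0, t0, r1, s1, t1 =>
    if r1 = 0 then (r0, s0, t0)
    else
      pvEgcdLoop fuel r1 s1 t1 (PySem.Int.mod r0 r1) (s0 - s1 * (PySem.Int.floordiv r0 r1))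
        (t0 - t1 * (PySem.Int.floordiv r0 r1))

def base_egcd (a b : Int) : Int × Int × Int := pvEgcdLoop (b.natAbs + 1) a 1 0 b 0 1

def base_inverse (a : Int) : Int :=
  let b := (base_egcd a pvPRIME).2.1
  if b ≥ 0 then b else b + pvPRIME

def base_add (a b : Int) : Int := PySem.Int.mod (a + b) pvPRIME
def base_sub (a b : Int) : Int := PySem.Int.mod (a - b) pvPRIME
def base_mul (a b : Int) : Int := PySem.Int.mod (a * b) pvPRIME
def base_div (a b : Int) : Int := base_mul a (base_inverse b)

-- 'for i in reversed(range(len(A))): if A[i] != 0: return A[:i+1]' / 'return []'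
def pvCanonLoop (A : List Int) : Nat → List Int
  | 0 => []
  | n + 1 =>
    if PySem.List.pyGetD A (n : Int) 0 ≠ 0 then PySem.List.slice A none (some ((n : Int) + 1))
    else pvCanonLoop A n

def canonical (A : List Int) : List Int := pvCanonLoop A A.length

def poly_scalardiv (A : List Int) (b : Int) : List Int := canonical (A.map (fun a => base_div a b))

def poly_mul (A B : List Int) : List Int :=
  let C : List Int := List.replicate (PySem.List.len A + PySem.List.len B - 1).toNat 0
  let C := (PySem.List.pyRange 0 (PySem.List.len A) 1).foldl (fun C i =>
    (PySem.List.pyRange 0 (PySem.List.len B) 1).foldl (fun C j =>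
      PySem.List.pySetD C (i + j)
        (base_add (PySem.List.pyGetD C (i + j) 0)
          (base_mul (PySem.List.pyGetD A i 0) (PySem.List.pyGetD B j 0)))) C) C
  canonical C

def lagrange_polynomials (xs : List Int) : List (List Int) :=
  (PySem.List.enumerate xs 0).foldl (fun polys ix =>
    let st := (PySem.List.enumerate xs 0).foldl (fun (st : List Int × Int) jx =>
      if jx.1 = ix.1 then st
      else (poly_mul st.1 [base_sub 0 jx.2, 1], base_mul st.2 (base_sub ix.2 jx.2))) ([1], 1)
    polys ++ [poly_scalardiv st.1 st.2]) []

-- ===== PORT B =====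
-- 'while poly and poly[-1] == 0: poly.pop()'  (exact: removes the trailing zeros)
def pvTrimRev : List Int → List Int
  | [] => []
  | a :: as => if a = 0 then pvTrimRev as else a :: as

def pvTrim (P : List Int) : List Int := (pvTrimRev P.reverse).reverse

def lagrange_polynomials_alt (xs : List Int) : List (List Int) :=
  let p : Int := 433
  let n := xs.length
  let master := xs.foldl (fun master xj =>
    let c := PySem.Int.mod (-xj) p
    let st := master.foldl (fun (st : List Int × Int) a =>
      (st.1 ++ [PySem.Int.mod (c * a + st.2) p], a)) ([], 0)
    st.1 ++ [st.2]) [1]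
  (PySem.List.enumerate xs 0).foldl (fun polys ix =>
    let st := (PySem.List.pyRange ((n : Int) - 1) (-1) (-1)).foldl
      (fun (st : List Int × Int) k =>
        (st.1 ++ [st.2], PySem.Int.mod (PySem.List.pyGetD master k 0 + ix.2 * st.2) p))
      ([], PySem.List.pyGetD master (n : Int) 0)
    let numerator := st.1.reverse    -- q_rev[::-1] (PySem.List.slice?_none_none_neg_one)
    let d := (PySem.List.enumerate xs 0).foldl
      (fun d jx => if jx.1 ≠ ix.1 then PySem.Int.mod (d * (ix.2 - jx.2)) p else d) 1
    let inv := PySem.Int.powMod d 431 433    -- pow(d, p - 2, p)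
    let poly := pvTrim (numerator.map (fun a => PySem.Int.mod (a * inv) p))
    polys ++ [poly]) []

-- ===== PRECONDITION & SPEC =====
def Spec_lagrange_polynomials (xs : List Int) (out : List (List Int)) : Prop := out = lagrange_polynomials_alt xs
instance (xs : List Int) (out : List (List Int)) : Decidable (Spec_lagrange_polynomials xs out) := by unfold Spec_lagrange_polynomials; infer_instance

-- ===== CLAIM (what is proved, stated in full; the proofs are below) =====
def Claim_equal_lagrange_polynomials : Prop := ∀ (xs : List Int), Dom_lagrange_polynomials xs → Spec_lagrange_polynomials xs (lagrange_polynomials xs)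

-- ===== LEMMAS AND PROOFS =====

-- proof-layer clean forms: multiplication by (x + c) and synthetic division, mod 433
def pvMlin (c : Int) : Int → List Int → List Int
  | prev, [] => [prev]
  | prev, a :: as => ((c * a + prev) % 433) :: pvMlin c a as

def pvSdiv (xi : Int) : Int → List Int → List Int
  | _, [] => []
  | acc, m :: ms => acc :: pvSdiv xi ((m + xi * acc) % 433) ms

def pvInR (P : List Int) : Prop := ∀ a ∈ P, 0 ≤ a ∧ a < 433

def pvGoodP (w : List Int) : Prop := pvInR w ∧ w ≠ [] ∧ w.getLast? = some 1

-- mod-433 arithmetic helpers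
theorem pvmod_eq (x : Int) : PySem.Int.mod x 433 = x % 433 :=
  PySem.Int.mod_eq_emod_of_pos (by norm_num)

theorem pvmod_range (x : Int) : 0 ≤ x % 433 ∧ x % 433 < 433 :=
  ⟨Int.emod_nonneg x (by norm_num), Int.emod_lt_of_pos x (by norm_num)⟩

theorem pvabsL (x y : Int) : (x % 433 + y) % 433 = (x + y) % 433 := by
  omega

theorem pvabsR (x y : Int) : (x + y % 433) % 433 = (x + y) % 433 := by
  omega

theorem pvabsM (x y : Int) : (x * (y % 433)) % 433 = (x * y) % 433 := by
  conv_lhs => rw [Int.mul_emod, Int.emod_emod_of_dvd _ dvd_rfl, ← Int.mul_emod]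

theorem pvabsMA (x y z : Int) : (x * (y % 433) + z) % 433 = (x * y + z) % 433 := by
  rw [Int.add_emod, pvabsM, ← Int.add_emod]

theorem pvLastD_mem (l : List Int) : ∀ d : Int, l = [] ∨ l.getLastD d ∈ l := by
  induction l with
  | nil => exact fun _ => Or.inl rfl
  | cons a as ih =>
    intro d
    right
    rw [List.getLastD_cons]
    rcases ih a with h | h
    · subst h; simp
    · exact List.mem_cons_of_mem _ h

theorem pvmod_small (x : Int) (h0 : 0 ≤ x) (h1 : x < 433) : x % 433 = x := by
  omega

-- pvMlin structure
theorem pvMlin_ne_nil (c prev : Int) (P : List Int) : pvMlin c prev P ≠ [] := by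
  cases P <;> simp [pvMlin]

theorem length_pvMlin (c prev : Int) (P : List Int) : (pvMlin c prev P).length = P.length + 1 := by
  induction P generalizing prev with
  | nil => simp [pvMlin]
  | cons a as ih => simp [pvMlin, ih]

theorem getLast?_pvMlin (c prev : Int) (P : List Int) :
    (pvMlin c prev P).getLast? = some (P.getLastD prev) := by
  induction P generalizing prev with
  | nil => simp [pvMlin]
  | cons a as ih =>
    simp [pvMlin, List.getLast?_cons, ih a]

theorem pvInR_pvMlin (c prev : Int) (P : List Int) (hP : pvInR P) (h0 : 0 ≤ prev) (h1 : prev < 433) :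
    pvInR (pvMlin c prev P) := by
  induction P generalizing prev with
  | nil => intro a ha; simp [pvMlin] at ha; subst ha; exact ⟨h0, h1⟩
  | cons b bs ih =>
    intro a ha
    rw [pvMlin] at ha
    rcases List.mem_cons.mp ha with h | h
    · subst h; exact pvmod_range _
    · exact ih b (fun z hz => hP z (List.mem_cons_of_mem _ hz)) (hP b (by simp)).1
        (hP b (by simp)).2 a h

theorem pvMlin_getD (c prev : Int) (P : List Int) (i : Nat) (h : i < P.length) :
    (pvMlin c prev P).getD i 0 =
      (c * P.getD i 0 + (if i = 0 then prev else P.getD (i - 1) 0)) % 433 := by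
  induction P generalizing prev i with
  | nil => simp at h
  | cons a as ih =>
    cases i with
    | zero => simp [pvMlin]
    | succ i =>
      simp only [pvMlin, List.getD_cons_succ]
      rw [ih a i (by simpa using h)]
      rcases i with _ | j <;> simp

theorem pvMlin_snoc (c prev a : Int) (Q : List Int) :
    pvMlin c prev (Q ++ [a]) =
      (pvMlin c prev Q).dropLast ++ [(c * a + Q.getLastD prev) % 433, a] := by
  induction Q generalizing prev with
  | nil => simp [pvMlin]
  | cons q qs ih =>
    simp only [List.cons_append, pvMlin, List.getLastD_cons]
    rw [ih q, List.dropLast_cons_of_ne_nil (pvMlin_ne_nil c q qs)]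
    simp

-- commutativity of the linear-factor steps
theorem pvMlin_swap_aux (a b : Int) : ∀ (qs : List Int) (q w : Int),
    pvMlin a ((b * q + w) % 433) (pvMlin b q qs) = pvMlin b ((a * q + w) % 433) (pvMlin a q qs) := by
  intro qs
  induction qs with
  | nil =>
    intro q w
    simp only [pvMlin]
    rw [pvabsR, pvabsR]
    ring_nf
  | cons q1 qs ih =>
    intro q w
    simp only [pvMlin]
    refine congrArg₂ List.cons ?_ (ih q1 q)
    rw [pvabsR, pvabsR, pvabsMA, pvabsMA]
    ring_nf

theorem pvMlin_comm (a b : Int) (P : List Int) :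
    pvMlin a 0 (pvMlin b 0 P) = pvMlin b 0 (pvMlin a 0 P) := by
  cases P with
  | nil => simp [pvMlin]
  | cons q qs =>
    simp only [pvMlin]
    refine congrArg₂ List.cons ?_ ?_
    · simp only [add_zero]; rw [pvabsM, pvabsM]; ring_nf
    · have := pvMlin_swap_aux a b qs q 0
      simpa using this

-- canonical is trailing-zero removal
theorem pvCanonLoop_prefix (Q : List Int) (a : Int) :
    ∀ m : Nat, m ≤ Q.length → pvCanonLoop (Q ++ [a]) m = pvCanonLoop Q m := by
  intro m
  induction m with
  | zero => intro _; rfl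
  | succ m ih =>
    intro hm
    simp only [pvCanonLoop]
    rw [show PySem.List.pyGetD (Q ++ [a]) (m : Int) 0 = PySem.List.pyGetD Q (m : Int) 0 by
        rw [PySem.List.pyGetD_natCast, PySem.List.pyGetD_natCast, List.getD_append _ _ _ m (by omega)],
      show PySem.List.slice (Q ++ [a]) none (some ((m : Int) + 1)) =
          PySem.List.slice Q none (some ((m : Int) + 1)) by
        rw [PySem.List.slice_to _ (by omega), PySem.List.slice_to _ (by omega),
          show ((m : Int) + 1).toNat = m + 1 by omega,
          List.take_append_of_le_length (by omega)],
      ih (by omega)]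

theorem canonical_eq_trim (A : List Int) : canonical A = pvTrim A := by
  induction A using List.reverseRecOn with
  | nil => rfl
  | append_singleton Q a ih =>
    unfold canonical
    rw [show (Q ++ [a]).length = Q.length + 1 by simp]
    simp only [pvCanonLoop]
    rw [show PySem.List.pyGetD (Q ++ [a]) (Q.length : Int) 0 = a by
        rw [PySem.List.pyGetD_natCast, List.getD_eq_getElem _ _ (by simp)]
        simp,
      pvCanonLoop_prefix Q a Q.length le_rfl]
    unfold pvTrim
    rw [List.reverse_concat]
    by_cases ha : a = 0
    · rw [if_neg (by simpa using ha)]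
      rw [pvTrimRev, if_pos ha]
      exact ih
    · rw [if_pos (by simpa using ha)]
      rw [pvTrimRev, if_neg ha]
      rw [PySem.List.slice_to _ (by omega), show ((Q.length : Int) + 1).toNat = Q.length + 1 by omega,
        List.take_of_length_le (by simp)]
      simp

theorem canonical_of_last_one (A : List Int) (h : A.getLast? = some 1) : canonical A = A := by
  rw [canonical_eq_trim A]
  obtain ⟨Q, rfl⟩ := List.getLast?_eq_some_iff.mp h
  unfold pvTrim
  rw [List.reverse_concat, pvTrimRev, if_neg (by norm_num)]
  simp

-- A's poly_mul by a monic linear factor is pvMlin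
theorem getD_mid (T R : List Int) (m d : Int) : (T ++ m :: R).getD T.length d = m := by
  rw [List.getD_eq_getElem?_getD, List.getElem?_append_right le_rfl]
  simp

theorem set_mid (T R : List Int) (m v : Int) : (T ++ m :: R).set T.length v = T ++ v :: R := by
  rw [List.set_append_right _ _ le_rfl]
  simp

theorem getD_mid2 (T : List Int) (a b d : Int) (R : List Int) :
    (T ++ a :: b :: R).getD (T.length + 1) d = b := by
  rw [List.getD_eq_getElem?_getD, List.getElem?_append_right (by omega)]
  rw [show T.length + 1 - T.length = 1 by omega]
  rfl

theorem set_mid2 (T : List Int) (a b v : Int) (R : List Int) :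
    (T ++ a :: b :: R).set (T.length + 1) v = T ++ a :: v :: R := by
  rw [List.set_append_right _ _ (by omega)]
  rw [show T.length + 1 - T.length = 1 by omega]
  rfl

theorem base_add_eq (a b : Int) : base_add a b = (a + b) % 433 := by
  simp [base_add, pvPRIME]

theorem base_mul_eq (a b : Int) : base_mul a b = (a * b) % 433 := by
  simp [base_mul, pvPRIME]

theorem poly_mul_linear (P : List Int) (c : Int) (hP : pvInR P) (hne : P ≠ [])
    (hlast : P.getLast? = some 1) : poly_mul P [c, 1] = pvMlin c 0 P := by
  simp only [poly_mul, PySem.List.len_eq, List.length_cons, List.length_nil, Nat.reduceAdd,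
    Nat.cast_ofNat]
  rw [show ((P.length : Int) + 2 - 1).toNat = P.length + 1 by omega]
  rw [show PySem.List.pyRange 0 2 1 = [0, 1] from rfl]
  have hlen1 : 1 ≤ P.length := List.length_pos_of_ne_nil hne
  set N := P.length with hN
  set M := pvMlin c 0 P with hMdef
  have hMlen : M.length = N + 1 := length_pvMlin c 0 P
  set body : List Int → Int → List Int := fun C i =>
    List.foldl
      (fun C j =>
        PySem.List.pySetD C (i + j)
          (base_add (PySem.List.pyGetD C (i + j) 0)
            (base_mul (PySem.List.pyGetD P i 0) (PySem.List.pyGetD [c, 1] j 0)))) C [0, 1]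
    with hbody
  have hstep : ∀ (T R : List Int) (i : Nat), T.length = i → i < N →
      body (T ++ (if i = 0 then (0:Int) else P.getD (i-1) 0) :: 0 :: R) (i : Int) =
        T ++ M.getD i 0 :: P.getD i 0 :: R := by
    intro T R i hT hiN
    subst hT
    have hPi : 0 ≤ P.getD T.length 0 ∧ P.getD T.length 0 < 433 := by
      rw [List.getD_eq_getElem _ _ hiN]
      exact hP _ (List.getElem_mem hiN)
    rw [hbody]
    simp only [List.foldl_cons, List.foldl_nil, add_zero]
    rw [show PySem.List.pyGetD [c, (1:Int)] 0 0 = c from rfl,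
      show PySem.List.pyGetD [c, (1:Int)] 1 0 = 1 from rfl,
      PySem.List.pyGetD_natCast, getD_mid, PySem.List.pySetD_natCast, set_mid]
    rw [show (T.length : Int) + 1 = ((T.length + 1 : Nat) : Int) by push_cast; ring]
    simp only [PySem.List.pyGetD_natCast, PySem.List.pySetD_natCast]
    rw [getD_mid2, set_mid2]
    have hv1 : base_add (if T.length = 0 then (0:Int) else P.getD (T.length-1) 0)
        (base_mul (P.getD T.length 0) c) = M.getD T.length 0 := by
      rw [base_add_eq, base_mul_eq, pvabsR, pvMlin_getD c 0 P T.length hiN]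
      congr 1
      ring
    have hv2 : base_add 0 (base_mul (P.getD T.length 0) 1) = P.getD T.length 0 := by
      rw [base_add_eq, base_mul_eq, mul_one, zero_add, Int.emod_emod_of_dvd _ dvd_rfl]
      exact pvmod_small _ hPi.1 hPi.2
    rw [hv1, hv2]
  have main : ∀ i : Nat, i ≤ N →
      List.foldl body (List.replicate (N + 1) 0) (PySem.List.pyRange 0 (i : Int) 1) =
        M.take i ++ (if i = 0 then (0:Int) else P.getD (i-1) 0) :: List.replicate (N - i) 0 := by
    intro i
    induction i with
    | zero =>
      intro _
      rw [show ((0 : Nat) : Int) = 0 from rfl, PySem.List.pyRange_one_eq_nil le_rfl]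
      simp [List.replicate_succ]
    | succ i ih =>
      intro hi
      rw [show ((i + 1 : Nat) : Int) = (i : Int) + 1 by push_cast; ring,
        PySem.List.pyRange_one_succ_right (Int.natCast_nonneg i), List.foldl_append,
        List.foldl_cons, List.foldl_nil, ih (by omega)]
      rw [show List.replicate (N - i) (0:Int) = 0 :: List.replicate (N - (i+1)) 0 by
        rw [← List.replicate_succ]; congr 1; omega]
      rw [hstep (M.take i) (List.replicate (N - (i+1)) 0) i (by simp [List.length_take]; omega)
        (by omega)]
      rw [show (if i + 1 = 0 then (0:Int) else P.getD ((i+1)-1) 0) = P.getD i 0 by simp]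
      rw [List.take_add_one, List.getElem?_eq_getElem (show i < M.length by omega),
        show (some M[i]).toList = [M[i]] from rfl,
        show M.getD i 0 = M[i] from List.getD_eq_getElem _ _ (by omega)]
      simp only [List.append_assoc, List.cons_append, List.nil_append]
  rw [main N le_rfl]
  have hlastD : P.getLastD 0 = 1 := by
    rw [List.getLastD_eq_getLast?, hlast]; rfl
  have hfin : M.take N ++ (if N = 0 then (0:Int) else P.getD (N-1) 0) :: List.replicate (N - N) 0 = M := by
    rw [if_neg (by omega), Nat.sub_self, List.replicate_zero]
    have h1 : P.getD (N-1) 0 = P.getLastD 0 := by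
      rw [List.getLastD_eq_getLast?, List.getLast?_eq_getElem?, List.getD_eq_getElem?_getD, hN]
    obtain ⟨ys, hys⟩ := List.getLast?_eq_some_iff.mp (getLast?_pvMlin c 0 P)
    rw [← hMdef] at hys
    have hyslen : ys.length = N := by
      have h2 := congrArg List.length hys
      rw [hMlen] at h2
      simp at h2
      omega
    rw [h1, hys, List.take_append_of_le_length (by omega), List.take_of_length_le (by omega)]
  rw [hfin]
  exact canonical_of_last_one M (by rw [hMdef, getLast?_pvMlin, hlastD])

-- the modular inverse of A equals B's Fermat power, on the residue range
set_option maxRecDepth 100000 in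
theorem inv_eq_pow (d : Int) (h0 : 0 ≤ d) (h1 : d < 433) :
    base_inverse d = PySem.Int.powMod d 431 433 := by
  have hall : ∀ k ∈ List.range 433, base_inverse (k : Int) = PySem.Int.powMod (k : Int) 431 433 := by
    decide
  have hd : d = ((d.toNat : Nat) : Int) := (Int.toNat_of_nonneg h0).symm
  rw [hd]
  exact hall d.toNat (List.mem_range.mpr (by omega))

-- enumerate-with-skip is a fold over the remaining elements
theorem foldl_enum_skip {β : Type} (h : β → Int → β) (u v : List Int) (x : Int) (init : β) :
    List.foldl (fun acc jx => if jx.1 = (u.length : Int) then acc else h acc jx.2) init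
      (PySem.List.enumerate (u ++ x :: v) 0) = List.foldl h init (u ++ v) := by
  rw [PySem.List.enumerate_append, PySem.List.enumerate_cons, List.foldl_append,
    List.foldl_append]
  have hu : ∀ (init : β), List.foldl
      (fun acc jx => if jx.1 = (u.length : Int) then acc else h acc jx.2) init
      (PySem.List.enumerate u 0) = List.foldl h init u := by
    intro init
    rw [PySem.List.foldl_congr_mem' _ _ (fun acc jx => h acc jx.2) init (by
      intro jx hjx acc
      obtain ⟨k, hk, rfl⟩ := (PySem.List.mem_enumerate_iff u 0 jx).mp hjx
      rw [if_neg (by simp; omega)])]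
    conv_rhs => rw [← PySem.List.map_snd_enumerate u 0]
    rw [List.foldl_map]
  have hv : ∀ (init : β), List.foldl
      (fun acc jx => if jx.1 = (u.length : Int) then acc else h acc jx.2) init
      (PySem.List.enumerate v (0 + (u.length : Int) + 1)) = List.foldl h init v := by
    intro init
    rw [PySem.List.foldl_congr_mem' _ _ (fun acc jx => h acc jx.2) init (by
      intro jx hjx acc
      obtain ⟨k, hk, rfl⟩ := (PySem.List.mem_enumerate_iff v _ jx).mp hjx
      rw [if_neg (by simp; omega)])]
    conv_rhs => rw [← PySem.List.map_snd_enumerate v (0 + (u.length : Int) + 1)]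
    rw [List.foldl_map]
  rw [hu, List.foldl_cons, if_pos (by norm_num), hv]

-- a pair fold whose components do not interact splits
theorem foldl_pair_split {α β γ : Type} (cnd : α → Prop) [DecidablePred cnd] (f : β → α → β) (g : γ → α → γ) :
    ∀ (l : List α) (a : β) (b : γ),
      List.foldl (fun st jx => if cnd jx then st else (f st.1 jx, g st.2 jx)) (a, b) l =
        (List.foldl (fun w jx => if cnd jx then w else f w jx) a l,
         List.foldl (fun w jx => if cnd jx then w else g w jx) b l) := by
  intro l
  induction l with
  | nil => intro a b; rfl
  | cons x l ih =>
    intro a b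
    by_cases h : cnd x <;> simp [h, ih]

-- A's numerator fold is the pvMlin fold, and stays Good
theorem fold_pm_eq_mlin : ∀ (l : List Int) (w : List Int), pvGoodP w →
    List.foldl (fun w x => poly_mul w [base_sub 0 x, 1]) w l =
      List.foldl (fun w x => pvMlin ((-x) % 433) 0 w) w l ∧
    pvGoodP (List.foldl (fun w x => pvMlin ((-x) % 433) 0 w) w l) := by
  intro l
  induction l with
  | nil => intro w hw; exact ⟨rfl, hw⟩
  | cons x l ih =>
    intro w hw
    obtain ⟨hInR, hne, hlast⟩ := hw
    have hsub : base_sub 0 x = (-x) % 433 := by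
      simp [base_sub, pvPRIME]
    have hstep : poly_mul w [base_sub 0 x, 1] = pvMlin ((-x) % 433) 0 w := by
      rw [hsub]; exact poly_mul_linear w _ hInR hne hlast
    have hgood : pvGoodP (pvMlin ((-x) % 433) 0 w) := by
      refine ⟨pvInR_pvMlin _ _ _ hInR le_rfl (by norm_num), pvMlin_ne_nil _ _ _, ?_⟩
      rw [getLast?_pvMlin, List.getLastD_eq_getLast?, hlast]
      rfl
    rw [List.foldl_cons, List.foldl_cons, hstep]
    exact ih _ hgood

theorem length_fold_mlin : ∀ (l : List Int) (w : List Int),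
    (List.foldl (fun w x => pvMlin ((-x) % 433) 0 w) w l).length = w.length + l.length := by
  intro l
  induction l with
  | nil => intro w; rfl
  | cons x l ih =>
    intro w
    rw [List.foldl_cons, ih, length_pvMlin]
    simp only [List.length_cons]
    omega

-- pulling one factor out of the master fold
theorem fold_mlin_bubble (c : Int) : ∀ (v : List Int) (Q : List Int),
    List.foldl (fun w x => pvMlin ((-x) % 433) 0 w) (pvMlin c 0 Q) v =
      pvMlin c 0 (List.foldl (fun w x => pvMlin ((-x) % 433) 0 w) Q v) := by
  intro v
  induction v with
  | nil => intro Q; rfl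
  | cons y v ih =>
    intro Q
    rw [List.foldl_cons, List.foldl_cons, pvMlin_comm, ih]

theorem fold_mlin_extract (u v : List Int) (x : Int) (w : List Int) :
    List.foldl (fun w y => pvMlin ((-y) % 433) 0 w) w (u ++ x :: v) =
      pvMlin ((-x) % 433) 0 (List.foldl (fun w y => pvMlin ((-y) % 433) 0 w) w (u ++ v)) := by
  rw [List.foldl_append, List.foldl_cons, List.foldl_append]
  exact fold_mlin_bubble _ v _

-- B's master-building inner loop is pvMlin
theorem master_body_eq (c : Int) : ∀ (P : List Int) (pre : List Int) (prev : Int),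
    (P.foldl (fun (st : List Int × Int) a => (st.1 ++ [(c * a + st.2) % 433], a)) (pre, prev)).1 ++
      [(P.foldl (fun (st : List Int × Int) a => (st.1 ++ [(c * a + st.2) % 433], a)) (pre, prev)).2] =
      pre ++ pvMlin c prev P := by
  intro P
  induction P with
  | nil => intro pre prev; simp [pvMlin]
  | cons a as ih =>
    intro pre prev
    rw [List.foldl_cons]
    rw [ih (pre ++ [(c * a + prev) % 433]) a]
    simp [pvMlin]

-- B's countdown loop reads the master back to front
theorem sdiv_fold_range (master : List Int) (xi : Int) :
    ∀ (m : Nat), m ≤ master.length → ∀ (st : List Int × Int),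
      (PySem.List.pyRange ((m : Int) - 1) (-1) (-1)).foldl
        (fun (st : List Int × Int) k =>
          (st.1 ++ [st.2], (PySem.List.pyGetD master k 0 + xi * st.2) % 433)) st =
      ((master.take m).reverse).foldl
        (fun (st : List Int × Int) a => (st.1 ++ [st.2], (a + xi * st.2) % 433)) st := by
  intro m
  induction m with
  | zero =>
    intro _ st
    rw [show ((0 : Nat) : Int) - 1 = -1 by norm_num, PySem.List.pyRange_neg_one_eq_nil le_rfl]
    simp
  | succ m ih =>
    intro hm st
    have hm' : m < master.length := by omega
    rw [show ((m + 1 : Nat) : Int) - 1 = (m : Int) by push_cast; ring,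
      PySem.List.pyRange_neg_one_cons (by omega), List.foldl_cons,
      List.take_add_one, List.getElem?_eq_getElem hm']
    rw [show (List.take m master ++ (some master[m]).toList).reverse =
        master[m] :: (List.take m master).reverse by simp]
    rw [List.foldl_cons]
    rw [show PySem.List.pyGetD master (m : Int) 0 = master[m] by
      rw [PySem.List.pyGetD_natCast, List.getD_eq_getElem _ _ hm']]
    exact ih (by omega) _

theorem sdiv_fold_fst (xi : Int) : ∀ (L : List Int) (pre : List Int) (acc : Int),
    (L.foldl (fun (st : List Int × Int) a => (st.1 ++ [st.2], (a + xi * st.2) % 433)) (pre, acc)).1 =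
      pre ++ pvSdiv xi acc L := by
  intro L
  induction L with
  | nil => intro pre acc; simp [pvSdiv]
  | cons m ms ih =>
    intro pre acc
    rw [List.foldl_cons, ih (pre ++ [acc])]
    simp [pvSdiv]

-- synthetic division undoes the final linear factor
theorem sdiv_mlin (xi c : Int) (hc : (c + xi) % 433 = 0) : ∀ (N : List Int), pvInR N →
    pvSdiv xi (N.getLastD 0) ((pvMlin c 0 N).dropLast.reverse) = N.reverse := by
  intro N
  induction N using List.reverseRecOn with
  | nil => intro _; simp [pvMlin, pvSdiv]
  | append_singleton Q a ih =>
    intro hIn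
    have hLQ : 0 ≤ Q.getLastD 0 ∧ Q.getLastD 0 < 433 := by
      rcases pvLastD_mem Q 0 with h | h
      · subst h; norm_num
      · exact hIn _ (List.mem_append_left _ h)
    rw [pvMlin_snoc c 0 a Q, List.getLastD_concat]
    rw [show (pvMlin c 0 Q).dropLast ++ [(c * a + Q.getLastD 0) % 433, a] =
        ((pvMlin c 0 Q).dropLast ++ [(c * a + Q.getLastD 0) % 433]) ++ [a] by simp,
      List.dropLast_concat, List.reverse_append]
    simp only [List.reverse_cons, List.reverse_nil, List.nil_append, List.singleton_append,
      pvSdiv]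
    have hacc : ((c * a + Q.getLastD 0) % 433 + xi * a) % 433 = Q.getLastD 0 := by
      rw [pvabsL]
      have : c * a + Q.getLastD 0 + xi * a = Q.getLastD 0 + (c + xi) * a := by ring
      rw [this, Int.add_emod, Int.mul_emod, hc]
      simp only [zero_mul, Int.zero_emod, add_zero]
      rw [Int.emod_emod_of_dvd _ dvd_rfl]
      omega
    rw [hacc, ih (fun z hz => hIn z (List.mem_append_left _ hz)), List.reverse_append]
    simp

-- denominator folds agree and stay in the residue range
theorem den_fold_eq (xi : Int) (l : List Int) (d : Int) :
    List.foldl (fun d x => base_mul d (base_sub xi x)) d l =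
      List.foldl (fun d x => (d * (xi - x)) % 433) d l := by
  refine PySem.List.foldl_congr_mem l _ _ d (fun acc x _ => ?_)
  simp only [base_mul, base_sub, pvPRIME, pvmod_eq, pvabsM]

theorem den_fold_range (xi : Int) : ∀ (l : List Int) (d : Int), 0 ≤ d → d < 433 →
    0 ≤ List.foldl (fun d x => (d * (xi - x)) % 433) d l ∧
      List.foldl (fun d x => (d * (xi - x)) % 433) d l < 433 := by
  intro l
  induction l with
  | nil => intro d h0 h1; exact ⟨h0, h1⟩
  | cons x l ih =>
    intro d h0 h1
    rw [List.foldl_cons]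
    exact ih _ (pvmod_range _).1 (pvmod_range _).2

-- ===== VERDICT (by name: the statement is the Claim_ definition above) =====
theorem lagrange_polynomials_spec : Claim_equal_lagrange_polynomials := by
  intro xs _
  unfold Spec_lagrange_polynomials
  simp only [lagrange_polynomials, lagrange_polynomials_alt]
  rw [PySem.List.foldl_append_singleton_eq_map, PySem.List.foldl_append_singleton_eq_map]
  simp only [List.nil_append, pvmod_eq]
  have hmaster : List.foldl
      (fun master xj =>
        (List.foldl (fun st a => (st.1 ++ [((-xj) % 433 * a + st.2) % 433], a)) ([], 0) master).1 ++
          [(List.foldl (fun st a => (st.1 ++ [((-xj) % 433 * a + st.2) % 433], a)) ([], 0) master).2])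
      [1] xs = List.foldl (fun w y => pvMlin ((-y) % 433) 0 w) [1] xs := by
    refine PySem.List.foldl_congr_mem' xs _ _ [1] (fun y hy w => ?_)
    have h := master_body_eq ((-y) % 433) w [] 0
    simpa using h
  rw [hmaster]
  refine List.map_congr_left ?_
  intro ix hix
  obtain ⟨k, hk, rfl⟩ := (PySem.List.mem_enumerate_iff xs 0 ix).mp hix
  simp only [zero_add]
  obtain ⟨u, v, hxs, hu⟩ : ∃ u v : List Int, xs = u ++ xs[k] :: v ∧ u.length = k := by
    refine ⟨xs.take k, xs.drop (k + 1), ?_, by simp [List.length_take]; omega⟩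
    conv_lhs => rw [← List.take_append_drop k xs]
    rw [List.drop_eq_getElem_cons hk]
  generalize hgx : xs[k] = x at hxs ⊢
  subst hu
  rw [hxs]
  rw [foldl_pair_split (fun jx : Int × Int => jx.1 = (u.length : Int))
    (fun w (jx : Int × Int) => poly_mul w [base_sub 0 jx.2, 1])
    (fun d (jx : Int × Int) => base_mul d (base_sub x jx.2))
    (PySem.List.enumerate (u ++ x :: v) 0) [1] 1]
  simp only []
  rw [foldl_enum_skip (fun w y => poly_mul w [base_sub 0 y, 1]) u v x [1],
    foldl_enum_skip (fun d y => base_mul d (base_sub x y)) u v x 1, den_fold_eq]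
  have hbden : List.foldl
      (fun d (jx : Int × Int) => if jx.1 ≠ (u.length : Int) then d * (x - jx.2) % 433 else d) 1
      (PySem.List.enumerate (u ++ x :: v) 0) =
      List.foldl (fun d y => d * (x - y) % 433) 1 (u ++ v) := by
    rw [PySem.List.foldl_congr_mem' _ _
      (fun d (jx : Int × Int) => if jx.1 = (u.length : Int) then d else d * (x - jx.2) % 433) 1
      (fun jx _ d => by by_cases h : jx.1 = (u.length : Int) <;> simp [h])]
    exact foldl_enum_skip (fun d y => d * (x - y) % 433) u v x 1
  rw [hbden]
  have hgood1 : pvGoodP [1] := ⟨fun a ha => by simp at ha; omega, by simp, rfl⟩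
  obtain ⟨hnum, hGood⟩ := fold_pm_eq_mlin (u ++ v) [1] hgood1
  rw [hnum, fold_mlin_extract u v x [1]]
  set Nm := List.foldl (fun w y => pvMlin ((-y) % 433) 0 w) [1] (u ++ v) with hNmdef
  have hNmlen : Nm.length = u.length + v.length + 1 := by
    rw [hNmdef, length_fold_mlin]
    simp
    omega
  have hmlen : (pvMlin ((-x) % 433) 0 Nm).length = u.length + v.length + 2 := by
    rw [length_pvMlin]; omega
  have hLL : (u ++ x :: v).length = u.length + v.length + 1 := by simp; omega
  rw [sdiv_fold_range (pvMlin ((-x) % 433) 0 Nm) x (u ++ x :: v).length (by omega)]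
  rw [sdiv_fold_fst x]
  have hacc : PySem.List.pyGetD (pvMlin ((-x) % 433) 0 Nm) ((u ++ x :: v).length : Int) 0 =
      Nm.getLastD 0 := by
    rw [PySem.List.pyGetD_natCast, List.getD_eq_getElem?_getD,
      show (u ++ x :: v).length = (pvMlin ((-x) % 433) 0 Nm).length - 1 by omega,
      ← List.getLast?_eq_getElem?, getLast?_pvMlin]
    rfl
  rw [hacc]
  rw [show (pvMlin ((-x) % 433) 0 Nm).take (u ++ x :: v).length =
      (pvMlin ((-x) % 433) 0 Nm).dropLast by
    rw [List.dropLast_eq_take]; congr 1; omega]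
  rw [sdiv_mlin x ((-x) % 433) (by omega) Nm hGood.1, List.nil_append, List.reverse_reverse]
  have hD := den_fold_range x (u ++ v) 1 (by norm_num) (by norm_num)
  simp only [poly_scalardiv, base_div, base_mul_eq]
  rw [inv_eq_pow _ hD.1 hD.2, canonical_eq_trim]
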